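-- pv_equiv track=rewrite | github.com/ivan-yosifov88/python_fundamentals | just_exercise/array_manipulator.py | sum_pairs_command
-- ===== SOURCE A (Python) =====
-- def sum_pairs_command(num_list):
--     result_list = []
--     if len(num_list) % 2 == 0:
--         for i in range(0, len(num_list), 2):
--             result = num_list[i] + num_list[i + 1]
--             result_list.append(result)
--     else:
--         for i in range(0, len(num_list) - 1, 2):
--             result = num_list[i] + num_list[i + 1]
--             result_list.append(result)
--         result_list.append(num_list[-1])
--     return result_list
-- ===== SOURCE B (Python) =====
-- def sum_pairs_command(num_list):
--     # Single pass consuming an iterator two items at a time: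
--     # no indexing, no length-parity branching. When the iterator has no
--     # partner left for `a`, `a` itself is the unpaired tail element.
--     it = iter(num_list)
--     sentinel = object()
--     result = []
--     for a in it:
--         b = next(it, sentinel)
--         result.append(a if b is sentinel else a + b)
--     return result
-- ===== Notes on version B (the rewrite author's own statement) =====
-- stated objective: simpler
-- what changed: Replaces the two index-driven even/odd loops over range(.,.,2) (chosen by a length-parity branch) by a single pass that consumes an iterator two items at a time, appending a+b, or a alone when no partner remains; no indexing and no parity branching.
import Mathlib
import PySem

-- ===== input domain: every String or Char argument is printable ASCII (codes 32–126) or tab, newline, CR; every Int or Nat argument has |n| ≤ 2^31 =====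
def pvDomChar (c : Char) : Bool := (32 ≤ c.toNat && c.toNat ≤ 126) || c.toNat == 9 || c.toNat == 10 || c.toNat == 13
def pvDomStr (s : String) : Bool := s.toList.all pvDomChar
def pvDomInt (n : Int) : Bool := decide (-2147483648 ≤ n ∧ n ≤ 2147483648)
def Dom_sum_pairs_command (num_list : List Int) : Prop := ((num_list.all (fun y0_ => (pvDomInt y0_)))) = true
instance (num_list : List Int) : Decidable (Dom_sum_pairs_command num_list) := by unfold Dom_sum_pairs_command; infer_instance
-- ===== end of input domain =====

-- B replaces A's two index-driven even/odd loops by a single pass consuming the list two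
-- items at a time, pairing each element with its successor when one remains (objective: simpler).

-- ===== PORT A =====
def sum_pairs_command (num_list : List Int) : List Int :=
  if num_list.length % 2 = 0 then
    (PySem.List.pyRange 0 num_list.length 2).foldl
      (fun acc i => acc ++ [PySem.List.pyGetD num_list i 0 + PySem.List.pyGetD num_list (i + 1) 0]) []
  else
    ((PySem.List.pyRange 0 ((num_list.length : Int) - 1) 2).foldl
      (fun acc i => acc ++ [PySem.List.pyGetD num_list i 0 + PySem.List.pyGetD num_list (i + 1) 0]) [])
      ++ [PySem.List.pyGetD num_list (-1) 0]

-- ===== PORT B =====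
-- The iterator pass consumes one or two elements per step: `for a in it` with the iterator
-- exhausted = the [] case; `b = next(it, sentinel)` hitting the sentinel = the [x] case
-- (append a alone); otherwise append a + b and continue on the remaining items = cons-cons.
def sum_pairs_command_alt : List Int → List Int
  | [] => []
  | [x] => [x]
  | x :: y :: r => (x + y) :: sum_pairs_command_alt r

-- ===== PRECONDITION & SPEC =====
def Spec_sum_pairs_command (num_list : List Int) (out : List Int) : Prop := out = sum_pairs_command_alt num_list
instance (num_list : List Int) (out : List Int) : Decidable (Spec_sum_pairs_command num_list out) := by unfold Spec_sum_pairs_command; infer_instance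

-- ===== CLAIM (what is proved, stated in full; the proofs are below) =====
def Claim_equal_sum_pairs_command : Prop := ∀ (num_list : List Int), Dom_sum_pairs_command num_list → Spec_sum_pairs_command num_list (sum_pairs_command num_list)

-- ===== LEMMAS AND PROOFS =====

/-- A's inner loop written as a map computes pairwise sums of the first `2*n` elements
    as B's recursion does. -/
lemma map_pairs (n : Nat) : ∀ (xs : List Int), 2 * n ≤ xs.length →
    (List.range n).map (fun k : Nat => xs.getD (2 * k) 0 + xs.getD (2 * k + 1) 0)
      = sum_pairs_command_alt (xs.take (2 * n)) := by
  induction n with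
  | zero => intro xs _; simp [sum_pairs_command_alt]
  | succ m ih =>
    intro xs h
    match xs, h with
    | x :: y :: r, h =>
      rw [List.range_succ_eq_map, List.map_cons, List.map_map]
      have hf : ((fun k : Nat => (x :: y :: r).getD (2 * k) 0 + (x :: y :: r).getD (2 * k + 1) 0) ∘ Nat.succ)
          = fun k : Nat => r.getD (2 * k) 0 + r.getD (2 * k + 1) 0 := by
        funext k
        have h1 : 2 * Nat.succ k = 2 * k + 1 + 1 := by omega
        simp [h1]
      have hle : 2 * m ≤ r.length := by simp at h; omega
      have htake : (x :: y :: r).take (2 * (m + 1)) = x :: y :: r.take (2 * m) := by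
        have : 2 * (m + 1) = 2 * m + 1 + 1 := by omega
        simp [this]
      rw [hf, ih r hle, htake]
      simp [sum_pairs_command_alt]

lemma pairs_dropLast_append (xs : List Int) (h : xs.length % 2 = 1) :
    sum_pairs_command_alt (xs.take (xs.length - 1))
        ++ [xs.getLast (by intro hn; rw [hn] at h; simp at h)]
      = sum_pairs_command_alt xs := by
  induction xs using sum_pairs_command_alt.induct with
  | case1 => simp at h
  | case2 x => simp [sum_pairs_command_alt]
  | case3 x y r ih =>
    have hr : r.length % 2 = 1 := by simp at h; omega
    cases r with
    | nil => simp at hr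
    | cons a r' =>
      have hrne : (a :: r') ≠ [] := by simp
      have hlen : (x :: y :: a :: r').length - 1 = (r'.length + 1) + 1 := by simp
      rw [hlen, List.take_succ_cons, List.take_succ_cons]
      have hlast : (x :: y :: a :: r').getLast (by simp) = (a :: r').getLast hrne := by
        simp [List.getLast_cons]
      rw [hlast]
      simp only [sum_pairs_command_alt, List.cons_append]
      have := ih hr
      simp only [List.length_cons, Nat.add_sub_cancel] at this
      rw [this]

lemma A_eq_alt (xs : List Int) : sum_pairs_command xs = sum_pairs_command_alt xs := by
  unfold sum_pairs_command
  rw [PySem.List.pyRange_of_pos _ _ (by norm_num), PySem.List.pyRange_of_pos _ _ (by norm_num),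
    PySem.List.foldl_append_singleton_eq_map, PySem.List.foldl_append_singleton_eq_map,
    List.map_map, List.map_map, List.nil_append, List.nil_append]
  have hfun : ∀ xs : List Int,
      ((fun i : Int => PySem.List.pyGetD xs i 0 + PySem.List.pyGetD xs (i + 1) 0)
        ∘ fun k : Nat => (0 : Int) + 2 * (k : Int))
      = fun k : Nat => xs.getD (2 * k) 0 + xs.getD (2 * k + 1) 0 := by
    intro xs
    funext k
    have h1 : (0 : Int) + 2 * (k : Int) = ((2 * k : Nat) : Int) := by push_cast; ring
    have h2 : ((2 * k : Nat) : Int) + 1 = ((2 * k + 1 : Nat) : Int) := by push_cast; ring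
    simp only [Function.comp, h1, h2, PySem.List.pyGetD_natCast]
  rw [hfun]
  by_cases he : xs.length % 2 = 0
  · rw [if_pos he]
    by_cases h0 : xs.length = 0
    · simp [List.length_eq_zero_iff.mp h0, sum_pairs_command_alt]
    · have hlt : (0 : Int) < (xs.length : Int) := by omega
      rw [if_pos hlt]
      have hc : (((xs.length : Int) - 0 + 2 - 1) / 2).toNat = xs.length / 2 := by omega
      rw [hc, map_pairs (xs.length / 2) xs (by omega)]
      have : 2 * (xs.length / 2) = xs.length := by omega
      rw [this, List.take_length]
  · rw [if_neg he]
    have h1 : xs.length % 2 = 1 := by omega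
    have hne : xs ≠ [] := by intro hn; rw [hn] at h1; simp at h1
    have hgl : PySem.List.pyGetD xs (-1) 0 = xs.getLast hne := PySem.List.pyGetD_neg_one xs 0 hne
    by_cases hone : xs.length = 1
    · have : ¬ ((0 : Int) < (xs.length : Int) - 1) := by omega
      rw [if_neg this]
      rw [hgl]
      have := pairs_dropLast_append xs h1
      simpa [hone] using this
    · have hlt : (0 : Int) < (xs.length : Int) - 1 := by omega
      rw [if_pos hlt]
      have hc : (((xs.length : Int) - 1 - 0 + 2 - 1) / 2).toNat = xs.length / 2 := by omega
      rw [hc, map_pairs (xs.length / 2) xs (by omega)]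
      have h2 : 2 * (xs.length / 2) = xs.length - 1 := by omega
      rw [h2, hgl]
      exact pairs_dropLast_append xs h1

-- ===== VERDICT (by name: the statement is the Claim_ definition above) =====
theorem sum_pairs_command_spec : Claim_equal_sum_pairs_command := by
  intro xs _
  unfold Spec_sum_pairs_command
  rw [A_eq_alt]
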